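-- pv_equiv track=rewrite | github.com/Investigamer/omnitils | omnitils/logs.py | colorize_log_format
-- ===== SOURCE A (Python) =====
-- LEVEL_COLORS = {
--     'DEBUG': dict(
--         lvl=['lm'],
--         msg=['m'],
--         pos=['lc']),
--     'INFO': dict(
--         lvl=['le'],
--         msg=['e'],
--         pos=['lc']),
--     'SUCCESS': dict(
--         lvl=['lg'],
--         msg=['g'],
--         pos=['lc']),
--     'WARNING': dict(
--         lvl=['b', 'ly'],
--         msg=['y'],
--         pos=['ly']),
--     'ERROR': dict(
--         lvl=['lr', 'b'],
--         msg=['r'],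
--         pos=['lr']),
--     'CRITICAL': dict(
--         lvl=['lw', 'bg 130,0,0', 'b'],
--         msg=['lr', 'b'],
--         pos=['lr'])
-- }
--
-- def colorize_log_format(log_fmt: str, log_level: str) -> str:
--     """An internal utility function called by a handler to colorize custom tags in a log format string.
--
--     Args:
--         log_fmt: Log format string.
--         log_level: Level of current log to be formatted.
--
--     Returns:
--         str: Colorized log format string.
--     """
--
--     # Get log level colors
--     log_colors = LEVEL_COLORS.get(log_level) or LEVEL_COLORS['DEBUG']
--
--     # Replace each tag
--     for name, tag_group in log_colors.items():
--         left, right = '', ''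
--         for tag in tag_group:
--
--             # Open and close defined
--             if isinstance(tag, (tuple, list)):
--                 if len(tag) > 1:
--                     tag_open, tag_close = tag
--                     left = f'{left}<{tag_open}>'
--                     right = f'</{tag_close}>{right}'
--                     continue
--                 elif len(tag) == 1:
--                     tag = tag[0]
--
--             # One definition
--             left += f'<{tag}>'
--             right = f'</{tag}>{right}'
--
--         # Replace each opening and closing tag
--         log_fmt = log_fmt.replace(f'<{name}>', left).replace(f'</{name}>', right)
--     return log_fmt
-- ===== SOURCE B (Python) =====
-- import re
--
-- LEVEL_COLORS = {
--     'DEBUG': dict(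
--         lvl=['lm'],
--         msg=['m'],
--         pos=['lc']),
--     'INFO': dict(
--         lvl=['le'],
--         msg=['e'],
--         pos=['lc']),
--     'SUCCESS': dict(
--         lvl=['lg'],
--         msg=['g'],
--         pos=['lc']),
--     'WARNING': dict(
--         lvl=['b', 'ly'],
--         msg=['y'],
--         pos=['ly']),
--     'ERROR': dict(
--         lvl=['lr', 'b'],
--         msg=['r'],
--         pos=['lr']),
--     'CRITICAL': dict(
--         lvl=['lw', 'bg 130,0,0', 'b'],
--         msg=['lr', 'b'],
--         pos=['lr'])
-- }
--
--
-- def colorize_log_format(log_fmt: str, log_level: str) -> str: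
--     """Single-pass, table-driven variant: build the token -> markup map once,
--     then replace all six tags in one regex substitution over log_fmt."""
--     log_colors = LEVEL_COLORS.get(log_level) or LEVEL_COLORS['DEBUG']
--     table = {}
--     for name, tag_group in log_colors.items():
--         table[f'<{name}>'] = ''.join(f'<{tag}>' for tag in tag_group)
--         table[f'</{name}>'] = ''.join(f'</{tag}>' for tag in reversed(tag_group))
--     pattern = re.compile('|'.join(re.escape(token) for token in table))
--     return pattern.sub(lambda m: table[m.group(0)], log_fmt)
-- ===== Notes on version B (the rewrite author's own statement) =====
-- stated objective: alternative
-- what changed: A runs six sequential str.replace passes (two per tag name) over the format string; B precomputes a token-to-markup table once and rewrites all six tags in a single left-to-right pass via one re.sub over an alternation of the literal tokens.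
import Mathlib
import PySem

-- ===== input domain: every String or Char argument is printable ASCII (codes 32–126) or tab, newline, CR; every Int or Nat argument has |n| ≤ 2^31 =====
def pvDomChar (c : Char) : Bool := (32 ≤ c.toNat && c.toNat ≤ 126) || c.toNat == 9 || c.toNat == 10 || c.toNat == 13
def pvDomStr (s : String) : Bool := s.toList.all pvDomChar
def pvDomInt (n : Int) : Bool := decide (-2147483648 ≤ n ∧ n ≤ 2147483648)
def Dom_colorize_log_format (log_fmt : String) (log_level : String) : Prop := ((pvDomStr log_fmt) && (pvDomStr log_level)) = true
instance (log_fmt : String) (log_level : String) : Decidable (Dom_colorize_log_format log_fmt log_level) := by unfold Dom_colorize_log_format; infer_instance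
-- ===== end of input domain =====

-- B replaces A's six sequential str.replace passes over the format string by one
-- table-driven left-to-right substitution pass (a regex alternation over the six
-- literal tags); same return value.

-- ===== PORT A =====

def LEVEL_COLORS : PySem.Dict String (PySem.Dict String (List String)) :=
  PySem.Dict.mk [
    ("DEBUG",    PySem.Dict.mk [("lvl", ["lm"]), ("msg", ["m"]), ("pos", ["lc"])]),
    ("INFO",     PySem.Dict.mk [("lvl", ["le"]), ("msg", ["e"]), ("pos", ["lc"])]),
    ("SUCCESS",  PySem.Dict.mk [("lvl", ["lg"]), ("msg", ["g"]), ("pos", ["lc"])]),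
    ("WARNING",  PySem.Dict.mk [("lvl", ["b", "ly"]), ("msg", ["y"]), ("pos", ["ly"])]),
    ("ERROR",    PySem.Dict.mk [("lvl", ["lr", "b"]), ("msg", ["r"]), ("pos", ["lr"])]),
    ("CRITICAL", PySem.Dict.mk [("lvl", ["lw", "bg 130,0,0", "b"]), ("msg", ["lr", "b"]), ("pos", ["lr"])])]

-- Literal port of A.  `LEVEL_COLORS.get(log_level) or LEVEL_COLORS['DEBUG']`: the `or`
-- falls through exactly when `.get` gives None or an empty (falsy) dict.  The
-- `isinstance(tag, (tuple, list))` branch is dead: every tag in the module constant is a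
-- plain string (type `List String` here), so only the one-definition branch is ported.
def colorize_log_format (log_fmt : String) (log_level : String) : String :=
  let log_colors : PySem.Dict String (List String) :=
    match PySem.Dict.get? LEVEL_COLORS log_level with
    | some d => if d.items.isEmpty then ((PySem.Dict.get? LEVEL_COLORS "DEBUG").getD (PySem.Dict.mk [])) else d
    | none => (PySem.Dict.get? LEVEL_COLORS "DEBUG").getD (PySem.Dict.mk [])
  log_colors.items.foldl (fun fmt p =>
    let lr : String × String :=
      p.2.foldl (fun lr tag => (lr.1 ++ "<" ++ tag ++ ">", "</" ++ tag ++ ">" ++ lr.2)) ("", "")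
    PySem.Str.replace (PySem.Str.replace fmt ("<" ++ p.1 ++ ">") lr.1) ("</" ++ p.1 ++ ">") lr.2)
    log_fmt

-- ===== PORT B =====

-- Source B: table[f'<{name}>'] = ''.join(...); table[f'</{name}>'] = ''.join(... reversed ...)
def colorize_table (log_colors : PySem.Dict String (List String)) : PySem.Dict String String :=
  log_colors.items.foldl (fun tb p =>
    (tb.insert ("<" ++ p.1 ++ ">") (PySem.Str.join "" (p.2.map (fun tag => "<" ++ tag ++ ">")))).insert
      ("</" ++ p.1 ++ ">") (PySem.Str.join "" (p.2.reverse.map (fun tag => "</" ++ tag ++ ">"))))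
    PySem.Dict.empty

-- Source B's `pattern.sub(lambda m: table[m.group(0)], log_fmt)`: the pattern is a '|'-alternation
-- of re.escape'd literal tokens, so re.sub is exactly this left-to-right scan that, at each
-- position, substitutes the first table token matching there (exact: all alternatives are
-- literal strings).  The `- 1` in the drop only guards termination: every token `p.1` is
-- nonempty, so `cs.drop (p.1.length - 1) = (c :: cs).drop p.1.length`.
def substChars (tbl : List (List Char × List Char)) : List Char → List Char
  | [] => []
  | c :: cs =>
    match tbl.find? (fun p => p.1.isPrefixOf (c :: cs)) with
    | some p => p.2 ++ substChars tbl (cs.drop (p.1.length - 1))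
    | none => c :: substChars tbl cs
termination_by s => s.length
decreasing_by
  all_goals simp

def colorize_log_format_alt (log_fmt : String) (log_level : String) : String :=
  let log_colors : PySem.Dict String (List String) :=
    match PySem.Dict.get? LEVEL_COLORS log_level with
    | some d => if d.items.isEmpty then ((PySem.Dict.get? LEVEL_COLORS "DEBUG").getD (PySem.Dict.mk [])) else d
    | none => (PySem.Dict.get? LEVEL_COLORS "DEBUG").getD (PySem.Dict.mk [])
  let table := colorize_table log_colors
  String.ofList (substChars (table.items.map (fun p => (p.1.toList, p.2.toList))) log_fmt.toList)

-- ===== PRECONDITION & SPEC =====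
def Spec_colorize_log_format (log_fmt : String) (log_level : String) (out : String) : Prop := out = colorize_log_format_alt log_fmt log_level
instance (log_fmt : String) (log_level : String) (out : String) : Decidable (Spec_colorize_log_format log_fmt log_level out) := by unfold Spec_colorize_log_format; infer_instance

-- ===== CLAIM (what is proved, stated in full; the proofs are below) =====
def Claim_equal_colorize_log_format : Prop := ∀ (log_fmt : String) (log_level : String), Dom_colorize_log_format log_fmt log_level → Spec_colorize_log_format log_fmt log_level (colorize_log_format log_fmt log_level)

-- ===== LEMMAS AND PROOFS =====

-- A's six replace passes, as one fold over a (token, replacement) table.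
def repAll (tbl : List (List Char × List Char)) (s : List Char) : List Char :=
  tbl.foldl (fun acc p => PySem.Chars.replace acc p.1 p.2) s

-- Non-interference conditions on a substitution table: tokens and replacements are
-- nonempty; an occurrence of a token can never start strictly inside, nor straddle,
-- an occurrence of a (different) token or of any replacement.  Under these conditions
-- sequential global replaces coincide with the single left-to-right pass.
def tblOK (tbl : List (List Char × List Char)) : Bool :=
  tbl.all fun p =>
    !p.1.isEmpty && !p.2.isEmpty &&
    (tbl.all fun q =>
      ((List.range p.1.length).all fun k =>
        ((k == 0) && (p.1 == q.1)) || (!(q.1.isPrefixOf (p.1.drop k)) && !((p.1.drop k).isPrefixOf q.1))) &&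
      ((List.range p.2.length).all fun k =>
        !(q.1.isPrefixOf (p.2.drop k)) && !((p.2.drop k).isPrefixOf q.1)) &&
      ((List.range q.1.length).all fun m =>
        !((q.1.drop m).isPrefixOf p.2) && !(p.2.isPrefixOf (q.1.drop m))))

theorem tblOK_ne {tbl : List (List Char × List Char)} (hok : tblOK tbl = true)
    {p : List Char × List Char} (hp : p ∈ tbl) : p.1 ≠ [] ∧ p.2 ≠ [] := by
  simp only [tblOK, List.all_eq_true, Bool.and_eq_true, Bool.not_eq_eq_eq_not, Bool.not_true,
    List.isEmpty_eq_false_iff] at hok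
  exact ⟨((hok p hp).1).1, ((hok p hp).1).2⟩

theorem tblOK_tok {tbl : List (List Char × List Char)} (hok : tblOK tbl = true)
    {p q : List Char × List Char} (hp : p ∈ tbl) (hq : q ∈ tbl) {k : Nat}
    (hk : k < p.1.length) (hne : ¬ (k = 0 ∧ p.1 = q.1)) :
    ¬ (q.1 <+: p.1.drop k) ∧ ¬ (p.1.drop k <+: q.1) := by
  simp only [tblOK, List.all_eq_true, Bool.and_eq_true, Bool.or_eq_true, Bool.not_eq_eq_eq_not,
    Bool.not_true, List.mem_range, beq_iff_eq] at hok
  have h := ((hok p hp).2 q hq).1.1 k hk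
  rcases h with ⟨h1, h2⟩ | ⟨h1, h2⟩
  · exact absurd ⟨h1, h2⟩ hne
  · exact ⟨fun hc => by simp [List.isPrefixOf_iff_prefix.mpr hc] at h1,
      fun hc => by simp [List.isPrefixOf_iff_prefix.mpr hc] at h2⟩

theorem tblOK_rep {tbl : List (List Char × List Char)} (hok : tblOK tbl = true)
    {p q : List Char × List Char} (hp : p ∈ tbl) (hq : q ∈ tbl) {k : Nat}
    (hk : k < p.2.length) :
    ¬ (q.1 <+: p.2.drop k) ∧ ¬ (p.2.drop k <+: q.1) := by
  simp only [tblOK, List.all_eq_true, Bool.and_eq_true, Bool.or_eq_true, Bool.not_eq_eq_eq_not,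
    Bool.not_true, List.mem_range, beq_iff_eq] at hok
  obtain ⟨h1, h2⟩ := ((hok p hp).2 q hq).1.2 k hk
  exact ⟨fun hc => by simp [List.isPrefixOf_iff_prefix.mpr hc] at h1,
    fun hc => by simp [List.isPrefixOf_iff_prefix.mpr hc] at h2⟩

theorem tblOK_suf {tbl : List (List Char × List Char)} (hok : tblOK tbl = true)
    {p q : List Char × List Char} (hp : p ∈ tbl) (hq : q ∈ tbl) {m : Nat}
    (hm : m < q.1.length) :
    ¬ (q.1.drop m <+: p.2) ∧ ¬ (p.2 <+: q.1.drop m) := by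
  simp only [tblOK, List.all_eq_true, Bool.and_eq_true, Bool.or_eq_true, Bool.not_eq_eq_eq_not,
    Bool.not_true, List.mem_range, beq_iff_eq] at hok
  obtain ⟨h1, h2⟩ := ((hok p hp).2 q hq).2 m hm
  exact ⟨fun hc => by simp [List.isPrefixOf_iff_prefix.mpr hc] at h1,
    fun hc => by simp [List.isPrefixOf_iff_prefix.mpr hc] at h2⟩

-- ---- characterization of PySem.Chars.replace (no such lemmas exist in the prelude) ----

theorem go_acc (old new : List Char) (fuel : Nat) (l acc : List Char) :
    PySem.Chars.replace.go old new fuel l acc = acc.reverse ++ PySem.Chars.replace.go old new fuel l [] := by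
  induction fuel generalizing l acc with
  | zero => simp [PySem.Chars.replace.go]
  | succ f ih =>
    cases l with
    | nil => simp [PySem.Chars.replace.go]
    | cons c t =>
      simp only [PySem.Chars.replace.go]
      split
      · rw [ih _ (new.reverse ++ acc), ih _ (new.reverse ++ [])]; simp
      · rw [ih _ (c :: acc), ih _ ([c])]; simp

theorem go_fuel (old new : List Char) (hold : old ≠ []) :
    ∀ fuel (l : List Char), l.length ≤ fuel →
      PySem.Chars.replace.go old new fuel l [] = PySem.Chars.replace.go old new l.length l [] := by
  intro fuel
  induction fuel using Nat.strong_induction_on with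
  | _ fuel ih =>
    intro l hl
    match fuel, l with
    | 0, l =>
      have hz : l = [] := by cases l <;> simp_all
      subst hz; rfl
    | f + 1, [] => simp [PySem.Chars.replace.go]
    | f + 1, c :: t =>
      have h1 : 1 ≤ old.length := by cases old <;> simp_all
      rw [List.length_cons]
      simp only [PySem.Chars.replace.go]
      split
      · have hd : (List.drop old.length (c :: t)).length ≤ t.length := by
          simp only [List.length_drop, List.length_cons] at *
          omega
        rw [go_acc _ _ f, go_acc _ _ t.length]
        rw [ih f (by omega) _ (le_trans hd (by simp at hl; omega)),
            ih t.length (by simp at hl; omega) _ hd]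
      · have ht : t.length ≤ f := by simp at hl; omega
        rw [go_acc _ _ f, go_acc _ _ t.length, ih f (by omega) _ ht,
            ih t.length (by omega) _ le_rfl]

theorem replace_nil (old new : List Char) (h : old ≠ []) : PySem.Chars.replace [] old new = [] := by
  simp only [PySem.Chars.replace]
  rw [if_neg (by simp [h])]
  rfl

theorem replace_cons_of_not_prefix (old new : List Char) (c : Char) (cs : List Char)
    (h : ¬ old <+: (c :: cs)) :
    PySem.Chars.replace (c :: cs) old new = c :: PySem.Chars.replace cs old new := by
  have hold : old ≠ [] := by rintro rfl; exact h List.nil_prefix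
  simp only [PySem.Chars.replace, List.isEmpty_iff]
  rw [if_neg hold, if_neg hold, List.length_cons]
  simp only [PySem.Chars.replace.go]
  rw [if_neg (by simp [List.isPrefixOf_iff_prefix, h]), go_acc]
  simp

theorem replace_of_prefix (old new : List Char) (s : List Char) (hold : old ≠ []) (h : old <+: s) :
    PySem.Chars.replace s old new = new ++ PySem.Chars.replace (s.drop old.length) old new := by
  cases s with
  | nil =>
    have : old = [] := List.prefix_nil.mp h
    exact absurd this hold
  | cons c cs =>
    have h1 : 1 ≤ old.length := by cases old <;> simp_all
    have hd : (List.drop old.length (c :: cs)).length ≤ cs.length := by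
      simp only [List.length_drop, List.length_cons]; omega
    simp only [PySem.Chars.replace, List.isEmpty_iff]
    rw [if_neg hold, if_neg hold, List.length_cons]
    simp only [PySem.Chars.replace.go]
    rw [if_pos (by simp [List.isPrefixOf_iff_prefix, h]), go_acc,
        go_fuel old new hold cs.length _ hd]
    simp

theorem prefix_append_cases {p a u : List Char} (h : p <+: a ++ u) :
    p <+: a ∨ (a <+: p ∧ p.drop a.length <+: u) := by
  rcases le_or_gt p.length a.length with hle | hgt
  · exact Or.inl (List.prefix_of_prefix_length_le h (List.prefix_append a u) hle)
  · have ha : a <+: p := List.prefix_of_prefix_length_le (List.prefix_append a u) h (by omega)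
    refine Or.inr ⟨ha, ?_⟩
    obtain ⟨w, hw⟩ := h
    obtain ⟨p', rfl⟩ := ha
    refine ⟨w, ?_⟩
    have := hw
    rw [List.append_assoc] at this
    have := List.append_cancel_left this
    simpa using this

-- a replace pass crosses a block `a` inside which (at any offset, with any
-- continuation) no occurrence of `old` can start.
theorem replace_append_of_no_overlap (old new : List Char) (a u : List Char)
    (hc : ∀ k, k < a.length → ¬ (old <+: a.drop k) ∧ ¬ (a.drop k <+: old)) :
    PySem.Chars.replace (a ++ u) old new = a ++ PySem.Chars.replace u old new := by
  induction a with
  | nil => simp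
  | cons a0 a' ih =>
    have h0 := hc 0 (by simp)
    simp only [List.drop_zero] at h0
    have hnp : ¬ old <+: (a0 :: a') ++ u := by
      intro hp
      rcases prefix_append_cases hp with h | ⟨h, _⟩
      · exact h0.1 h
      · exact h0.2 h
    rw [List.cons_append]
    rw [replace_cons_of_not_prefix _ _ a0 (a' ++ u) (by simpa using hnp)]
    rw [ih (fun k hk => hc (k + 1) (by simp; omega))]
    simp

-- a replace pass cannot create an occurrence, at position 0, of any nonempty
-- suffix of Q, provided no such suffix can start inside or around `new`.
theorem not_prefix_replace (old new : List Char) (hold : old ≠ [])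
    (Q : List Char)
    (hQ : ∀ m, m < Q.length → ¬ (Q.drop m <+: new) ∧ ¬ (new <+: Q.drop m)) :
    ∀ v m, m < Q.length → ¬ (Q.drop m <+: v) → ¬ (Q.drop m <+: PySem.Chars.replace v old new) := by
  intro v
  induction v with
  | nil =>
    intro m hm _ hcon
    rw [replace_nil _ _ hold] at hcon
    have : Q.drop m = [] := List.prefix_nil.mp hcon
    have : Q.length ≤ m := by
      have := List.drop_eq_nil_iff.mp this
      omega
    omega
  | cons c vt ih =>
    intro m hm hnp hcon
    by_cases hpre : old <+: (c :: vt)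
    · rw [replace_of_prefix _ _ _ hold hpre] at hcon
      rcases prefix_append_cases hcon with h | ⟨h, _⟩
      · exact (hQ m hm).1 h
      · exact (hQ m hm).2 h
    · rw [replace_cons_of_not_prefix _ _ _ _ hpre] at hcon
      obtain ⟨q0, q', hq⟩ : ∃ q0 q', Q.drop m = q0 :: q' := by
        cases hd : Q.drop m with
        | nil =>
          have := List.drop_eq_nil_iff.mp hd
          omega
        | cons x xs => exact ⟨x, xs, rfl⟩
      have hq' : q' = Q.drop (m + 1) := by
        have := congrArg List.tail hq
        simpa [List.tail_drop] using this.symm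
      rw [hq, List.cons_prefix_cons] at hcon hnp
      obtain ⟨hc0, hcon'⟩ := hcon
      by_cases hm1 : m + 1 < Q.length
      · exact ih (m + 1) hm1 (fun hx => hnp ⟨hc0, hq' ▸ hx⟩) (hq' ▸ hcon')
      · have : q' = [] := by
          rw [hq']
          apply List.drop_eq_nil_iff.mpr
          omega
        rw [this] at hnp
        exact hnp ⟨hc0, List.nil_prefix⟩

theorem fold_nil {tbl : List (List Char × List Char)} (hok : tblOK tbl = true) :
    ∀ sub : List (List Char × List Char), (∀ p ∈ sub, p ∈ tbl) →
      sub.foldl (fun acc p => PySem.Chars.replace acc p.1 p.2) [] = [] := by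
  intro sub
  induction sub with
  | nil => intro _; rfl
  | cons e rest ih =>
    intro hsub
    simp only [List.foldl_cons]
    rw [replace_nil _ _ (tblOK_ne hok (hsub e (by simp))).1]
    exact ih (fun p hp => hsub p (by simp [hp]))

-- "no token matches at the head" is preserved by every replace pass of the table.
theorem inv_step {tbl : List (List Char × List Char)} (hok : tblOK tbl = true)
    {e : List Char × List Char} (he : e ∈ tbl) (c : Char) (Y : List Char)
    (hinv : ∀ p ∈ tbl, ¬ (p.1 <+: c :: Y)) :
    ∀ p ∈ tbl, ¬ (p.1 <+: c :: PySem.Chars.replace Y e.1 e.2) := by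
  intro p hp hcon
  obtain ⟨x, xs, hx⟩ : ∃ x xs, p.1 = x :: xs := by
    cases h : p.1 with
    | nil => exact absurd h (tblOK_ne hok hp).1
    | cons a b => exact ⟨a, b, rfl⟩
  rw [hx, List.cons_prefix_cons] at hcon
  obtain ⟨rfl, hcon⟩ := hcon
  cases xs with
  | nil => exact hinv p hp (by rw [hx]; exact List.cons_prefix_cons.mpr ⟨rfl, List.nil_prefix⟩)
  | cons y ys =>
    have hxs : (y :: ys) = p.1.drop 1 := by rw [hx]; rfl
    have h1 : 1 < p.1.length := by rw [hx]; simp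
    have hQ : ∀ m, m < p.1.length → ¬ (p.1.drop m <+: e.2) ∧ ¬ (e.2 <+: p.1.drop m) :=
      fun m hm => tblOK_suf hok he hp hm
    have hnp : ¬ (p.1.drop 1 <+: Y) := by
      rw [← hxs]
      intro hy
      exact hinv p hp (by rw [hx]; exact List.cons_prefix_cons.mpr ⟨rfl, hy⟩)
    exact not_prefix_replace e.1 e.2 (tblOK_ne hok he).1 p.1 hQ Y 1 h1 hnp (by rw [← hxs]; exact hcon)

theorem fold_nomatch {tbl : List (List Char × List Char)} (hok : tblOK tbl = true) (c : Char) :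
    ∀ (sub : List (List Char × List Char)), (∀ p ∈ sub, p ∈ tbl) →
      ∀ Y : List Char, (∀ p ∈ tbl, ¬ (p.1 <+: c :: Y)) →
      sub.foldl (fun acc p => PySem.Chars.replace acc p.1 p.2) (c :: Y)
        = c :: sub.foldl (fun acc p => PySem.Chars.replace acc p.1 p.2) Y := by
  intro sub
  induction sub with
  | nil => intro _ Y _; rfl
  | cons e rest ih =>
    intro hsub Y hinv
    have he : e ∈ tbl := hsub e (by simp)
    simp only [List.foldl_cons]
    rw [replace_cons_of_not_prefix _ _ _ _ (hinv e he)]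
    exact ih (fun p hp => hsub p (by simp [hp])) _ (inv_step hok he c Y hinv)

theorem fold_append (a : List Char) :
    ∀ (sub : List (List Char × List Char)),
      (∀ p ∈ sub, ∀ k, k < a.length → ¬ (p.1 <+: a.drop k) ∧ ¬ (a.drop k <+: p.1)) →
      ∀ u : List Char,
      sub.foldl (fun acc p => PySem.Chars.replace acc p.1 p.2) (a ++ u)
        = a ++ sub.foldl (fun acc p => PySem.Chars.replace acc p.1 p.2) u := by
  intro sub
  induction sub with
  | nil => intro _ u; rfl
  | cons e rest ih =>
    intro ha u
    simp only [List.foldl_cons]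
    rw [replace_append_of_no_overlap _ _ _ _ (ha e (by simp))]
    exact ih (fun p hp => ha p (by simp [hp])) _

-- the central lemma: under tblOK, the six sequential replaces are the single pass.
theorem repAll_eq_subst (tbl : List (List Char × List Char)) (hok : tblOK tbl = true) :
    ∀ s : List Char, repAll tbl s = substChars tbl s
  | [] => by
    rw [substChars]
    exact fold_nil hok tbl (fun p hp => hp)
  | c :: cs => by
    rw [substChars]
    cases hf : tbl.find? (fun p => p.1.isPrefixOf (c :: cs)) with
    | none =>
      have hno : ∀ p ∈ tbl, ¬ (p.1 <+: c :: cs) := by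
        intro p hp hcon
        have := List.find?_eq_none.mp hf p hp
        simp [List.isPrefixOf_iff_prefix] at this
        exact this hcon
      rw [repAll, fold_nomatch hok c tbl (fun p hp => hp) cs hno]
      exact congrArg (c :: ·) (repAll_eq_subst tbl hok cs)
    | some e =>
      obtain ⟨hpe, as, bs, htbl, hfirst⟩ := List.find?_eq_some_iff_append.mp hf
      have he : e ∈ tbl := by rw [htbl]; simp
      have hpre : e.1 <+: c :: cs := List.isPrefixOf_iff_prefix.mp hpe
      have hne : e.1 ≠ [] := (tblOK_ne hok he).1
      have h1 : 1 ≤ e.1.length := by cases h : e.1 <;> simp_all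
      obtain ⟨rest, hrest⟩ := hpre
      have hpre : e.1 <+: c :: cs := ⟨rest, hrest⟩
      have hcondA : ∀ p ∈ as, ∀ k, k < e.1.length →
          ¬ (p.1 <+: e.1.drop k) ∧ ¬ (e.1.drop k <+: p.1) := by
        intro p hp k hk
        have hptbl : p ∈ tbl := by rw [htbl]; simp [hp]
        refine tblOK_tok hok he hptbl hk ?_
        rintro ⟨rfl, heq⟩
        have hfalse : ¬ (p.1 <+: c :: cs) := by
          have hb := hfirst p hp
          simp only [Bool.not_eq_eq_eq_not, Bool.not_true] at hb
          intro hc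
          rw [List.isPrefixOf_iff_prefix.mpr hc] at hb
          exact Bool.true_eq_false.mp hb
        exact hfalse (heq ▸ hpre)
      have hcondB : ∀ p ∈ bs, ∀ k, k < e.2.length →
          ¬ (p.1 <+: e.2.drop k) ∧ ¬ (e.2.drop k <+: p.1) := by
        intro p hp k hk
        have hptbl : p ∈ tbl := by rw [htbl]; simp [hp]
        exact tblOK_rep hok he hptbl hk
      have hdrop : cs.drop (e.1.length - 1) = rest := by
        have : (c :: cs).drop e.1.length = rest := by
          rw [← hrest]; simp
        rw [← this]
        cases h : e.1 with
        | nil => exact absurd h hne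
        | cons x xs => simp
      rw [repAll, htbl, List.foldl_append, List.foldl_cons]
      rw [← hrest, fold_append e.1 as hcondA rest]
      rw [replace_of_prefix e.1 e.2 _ hne (List.prefix_append e.1 _), List.drop_left]
      rw [fold_append e.2 bs hcondB]
      have hassemble :
          bs.foldl (fun acc p => PySem.Chars.replace acc p.1 p.2)
            (PySem.Chars.replace (as.foldl (fun acc p => PySem.Chars.replace acc p.1 p.2) rest) e.1 e.2)
          = repAll tbl rest := by
        rw [repAll, htbl, List.foldl_append, List.foldl_cons]
      rw [hassemble, repAll_eq_subst tbl hok rest]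
      simp only [← htbl, hdrop]
termination_by s => s.length
decreasing_by
  all_goals (try simp)
  all_goals (have := congrArg List.length hrest; simp only [List.length_append, List.length_cons] at this; omega)

-- ---- the six per-level substitution tables (token, replacement) ----

def T_DEBUG : List (List Char × List Char) :=
  [("<lvl>".toList, "<lm>".toList), ("</lvl>".toList, "</lm>".toList),
   ("<msg>".toList, "<m>".toList), ("</msg>".toList, "</m>".toList),
   ("<pos>".toList, "<lc>".toList), ("</pos>".toList, "</lc>".toList)]

def T_INFO : List (List Char × List Char) :=
  [("<lvl>".toList, "<le>".toList), ("</lvl>".toList, "</le>".toList),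
   ("<msg>".toList, "<e>".toList), ("</msg>".toList, "</e>".toList),
   ("<pos>".toList, "<lc>".toList), ("</pos>".toList, "</lc>".toList)]

def T_SUCCESS : List (List Char × List Char) :=
  [("<lvl>".toList, "<lg>".toList), ("</lvl>".toList, "</lg>".toList),
   ("<msg>".toList, "<g>".toList), ("</msg>".toList, "</g>".toList),
   ("<pos>".toList, "<lc>".toList), ("</pos>".toList, "</lc>".toList)]

def T_WARNING : List (List Char × List Char) :=
  [("<lvl>".toList, "<b><ly>".toList), ("</lvl>".toList, "</ly></b>".toList),
   ("<msg>".toList, "<y>".toList), ("</msg>".toList, "</y>".toList),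
   ("<pos>".toList, "<ly>".toList), ("</pos>".toList, "</ly>".toList)]

def T_ERROR : List (List Char × List Char) :=
  [("<lvl>".toList, "<lr><b>".toList), ("</lvl>".toList, "</b></lr>".toList),
   ("<msg>".toList, "<r>".toList), ("</msg>".toList, "</r>".toList),
   ("<pos>".toList, "<lr>".toList), ("</pos>".toList, "</lr>".toList)]

def T_CRITICAL : List (List Char × List Char) :=
  [("<lvl>".toList, "<lw><bg 130,0,0><b>".toList), ("</lvl>".toList, "</b></bg 130,0,0></lw>".toList),
   ("<msg>".toList, "<lr><b>".toList), ("</msg>".toList, "</b></lr>".toList),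
   ("<pos>".toList, "<lr>".toList), ("</pos>".toList, "</lr>".toList)]

-- both ports reduce, at a fixed level, to repAll / substChars over the same table.
theorem ports_agree (lf lvl : String) (T : List (List Char × List Char)) (hok : tblOK T = true)
    (hA : colorize_log_format lf lvl = String.ofList (repAll T lf.toList))
    (hB : colorize_log_format_alt lf lvl = String.ofList (substChars T lf.toList)) :
    colorize_log_format lf lvl = colorize_log_format_alt lf lvl := by
  rw [hA, hB, repAll_eq_subst T hok]

-- ===== VERDICT (by name: the statement is the Claim_ definition above) =====
theorem colorize_log_format_spec : Claim_equal_colorize_log_format := by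
  intro lf lvl _
  unfold Spec_colorize_log_format
  by_cases h1 : lvl = "DEBUG"
  · subst h1
    exact ports_agree lf _ T_DEBUG (by decide)
      (by simp [colorize_log_format, repAll, T_DEBUG, LEVEL_COLORS, PySem.Dict.get?, PySem.Str.replace])
      (by simp [colorize_log_format_alt, colorize_table, T_DEBUG, LEVEL_COLORS, PySem.Dict.get?,
        PySem.Dict.insert, PySem.Dict.empty, PySem.Str.join, PySem.Chars.join, List.intercalate])
  by_cases h2 : lvl = "INFO"
  · subst h2
    exact ports_agree lf _ T_INFO (by decide)
      (by simp [colorize_log_format, repAll, T_INFO, LEVEL_COLORS, PySem.Dict.get?, PySem.Str.replace])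
      (by simp [colorize_log_format_alt, colorize_table, T_INFO, LEVEL_COLORS, PySem.Dict.get?,
        PySem.Dict.insert, PySem.Dict.empty, PySem.Str.join, PySem.Chars.join, List.intercalate])
  by_cases h3 : lvl = "SUCCESS"
  · subst h3
    exact ports_agree lf _ T_SUCCESS (by decide)
      (by simp [colorize_log_format, repAll, T_SUCCESS, LEVEL_COLORS, PySem.Dict.get?, PySem.Str.replace])
      (by simp [colorize_log_format_alt, colorize_table, T_SUCCESS, LEVEL_COLORS, PySem.Dict.get?,
        PySem.Dict.insert, PySem.Dict.empty, PySem.Str.join, PySem.Chars.join, List.intercalate])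
  by_cases h4 : lvl = "WARNING"
  · subst h4
    exact ports_agree lf _ T_WARNING (by decide)
      (by simp [colorize_log_format, repAll, T_WARNING, LEVEL_COLORS, PySem.Dict.get?, PySem.Str.replace])
      (by simp [colorize_log_format_alt, colorize_table, T_WARNING, LEVEL_COLORS, PySem.Dict.get?,
        PySem.Dict.insert, PySem.Dict.empty, PySem.Str.join, PySem.Chars.join, List.intercalate])
  by_cases h5 : lvl = "ERROR"
  · subst h5
    exact ports_agree lf _ T_ERROR (by decide)
      (by simp [colorize_log_format, repAll, T_ERROR, LEVEL_COLORS, PySem.Dict.get?, PySem.Str.replace])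
      (by simp [colorize_log_format_alt, colorize_table, T_ERROR, LEVEL_COLORS, PySem.Dict.get?,
        PySem.Dict.insert, PySem.Dict.empty, PySem.Str.join, PySem.Chars.join, List.intercalate])
  by_cases h6 : lvl = "CRITICAL"
  · subst h6
    exact ports_agree lf _ T_CRITICAL (by decide)
      (by simp [colorize_log_format, repAll, T_CRITICAL, LEVEL_COLORS, PySem.Dict.get?, PySem.Str.replace])
      (by simp [colorize_log_format_alt, colorize_table, T_CRITICAL, LEVEL_COLORS, PySem.Dict.get?,
        PySem.Dict.insert, PySem.Dict.empty, PySem.Str.join, PySem.Chars.join, List.intercalate])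
  -- unknown level: `.get` gives None, the `or` falls back to the DEBUG colors
  have hnone : PySem.Dict.get? LEVEL_COLORS lvl = none := by
    simp only [LEVEL_COLORS, PySem.Dict.get?]
    simp
    exact ⟨Ne.symm h1, Ne.symm h2, Ne.symm h3, Ne.symm h4, Ne.symm h5, Ne.symm h6⟩
  exact ports_agree lf _ T_DEBUG (by decide)
    (by
      simp only [colorize_log_format, hnone]
      simp [repAll, T_DEBUG, LEVEL_COLORS, PySem.Dict.get?, PySem.Str.replace])
    (by
      simp only [colorize_log_format_alt, hnone]
      simp [colorize_table, T_DEBUG, LEVEL_COLORS, PySem.Dict.get?, PySem.Dict.insert,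
        PySem.Dict.empty, PySem.Str.join, PySem.Chars.join, List.intercalate])
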